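-- pv_equiv track=rewrite | github.com/rosawoo/code-smell | detector/smell_detector.py | collect_boundaries
-- ===== SOURCE A (Python) =====
-- from typing import List, Dict, Tuple, Optional
--
-- def is_method(contents: List[str], index: int) -> bool:
--     line = contents[index].lstrip()
--     return line.startswith("def ")
--
-- def collect_boundaries(contents: List[str]) -> List[Tuple[int, int, int]]:
--     boundaries, current_start, blank_count = [], None, 0
--     for index in range(len(contents)):
--         if not is_method(contents, index):
--             if current_start is not None and contents[index].strip() == '':
--                 blank_count += 1
--             continue
--         if current_start is None:
--             current_start, blank_count = index, 0
--         else: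
--             boundaries.append((current_start, index, blank_count))
--             current_start, blank_count = index, 0
--     if current_start is not None:
--         boundaries.append((current_start, len(contents), blank_count))
--     return boundaries
-- ===== SOURCE B (Python) =====
-- def collect_boundaries(contents):
--     method_indices = [i for i in range(len(contents))
--                       if contents[i].lstrip().startswith("def ")]
--     boundaries = []
--     for j, start in enumerate(method_indices):
--         end = method_indices[j + 1] if j + 1 < len(method_indices) else len(contents)
--         blanks = sum(1 for k in range(start + 1, end) if contents[k].strip() == '')
--         boundaries.append((start, end, blanks))
--     return boundaries
-- ===== Notes on version B (the rewrite author's own statement) =====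
-- stated objective: alternative
-- what changed: Replaces A's single stateful scan (current_start/blank_count accumulator with a trailing flush) by first collecting all method line indices, then mapping consecutive index pairs to (start, end, blank-count-in-between) segments.
import Mathlib
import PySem

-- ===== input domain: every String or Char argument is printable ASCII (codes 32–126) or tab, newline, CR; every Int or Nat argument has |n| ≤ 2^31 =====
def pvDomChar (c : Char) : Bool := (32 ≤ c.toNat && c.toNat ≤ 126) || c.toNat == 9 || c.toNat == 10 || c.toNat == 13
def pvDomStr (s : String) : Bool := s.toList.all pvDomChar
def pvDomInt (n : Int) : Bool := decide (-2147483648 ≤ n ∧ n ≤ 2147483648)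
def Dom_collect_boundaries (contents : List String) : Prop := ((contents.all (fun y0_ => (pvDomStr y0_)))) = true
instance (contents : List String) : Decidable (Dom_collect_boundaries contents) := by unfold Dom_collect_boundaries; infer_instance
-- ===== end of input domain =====

-- B replaces A's stateful single scan by collecting the method indices first and mapping
-- consecutive pairs to segments (alternative decomposition, same cost).

-- ===== PORT A =====
-- indices used here always lie in range, so `getD` is exact for Python's contents[index]
def is_method (contents : List String) (index : Nat) : Bool :=
  PySem.Str.startswith (PySem.Str.lstrip (contents.getD index "")) "def "

def collect_boundaries_step (contents : List String)
    (s : List (Int × Int × Int) × Option Int × Int) (index : Nat) :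
    List (Int × Int × Int) × Option Int × Int :=
  let (boundaries, current_start, blank_count) := s
  if ¬ is_method contents index then
    if current_start.isSome && (PySem.Str.strip (contents.getD index "") == "") then
      (boundaries, current_start, blank_count + 1)
    else
      (boundaries, current_start, blank_count)
  else
    match current_start with
    | none => (boundaries, some (index : Int), 0)
    | some c => (boundaries ++ [(c, (index : Int), blank_count)], some (index : Int), 0)

def collect_boundaries (contents : List String) : List (Int × Int × Int) :=
  let st := (List.range contents.length).foldl (collect_boundaries_step contents) ([], none, 0)
  match st.2.1 with
  | none => st.1
  | some current_start => st.1 ++ [(current_start, (contents.length : Int), st.2.2)]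

-- ===== PORT B =====
def collect_boundaries_alt (contents : List String) : List (Int × Int × Int) :=
  let method_indices := (List.range contents.length).filter
    (fun i => PySem.Str.startswith (PySem.Str.lstrip (contents.getD i "")) "def ")
  (List.range method_indices.length).map (fun j =>
    let start := method_indices.getD j 0
    let stop := if j + 1 < method_indices.length then method_indices.getD (j + 1) 0
                else contents.length
    let blanks := ((List.range' (start + 1) (stop - (start + 1))).filter
      (fun k => PySem.Str.strip (contents.getD k "") == "")).length
    ((start : Int), (stop : Int), (blanks : Int)))

-- ===== PRECONDITION & SPEC =====
def Spec_collect_boundaries (contents : List String) (out : List (Int × Int × Int)) : Prop := out = collect_boundaries_alt contents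
instance (contents : List String) (out : List (Int × Int × Int)) : Decidable (Spec_collect_boundaries contents out) := by unfold Spec_collect_boundaries; infer_instance

-- ===== CLAIM (what is proved, stated in full; the proofs are below) =====
def Claim_equal_collect_boundaries : Prop := ∀ (contents : List String), Dom_collect_boundaries contents → Spec_collect_boundaries contents (collect_boundaries contents)

-- ===== LEMMAS AND PROOFS =====
def pvBlank (c : List String) (k : Nat) : Bool := PySem.Str.strip (c.getD k "") == ""

def pvBlanks (c : List String) (a b : Nat) : Nat :=
  ((List.range' a (b - a)).filter (fun k => pvBlank c k)).length

def pvSegs (c : List String) : List Nat → Nat → List (Int × Int × Int)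
  | [], _ => []
  | [a], n => [((a : Int), (n : Int), (pvBlanks c (a + 1) n : Int))]
  | a :: b :: rest, n =>
      ((a : Int), (b : Int), (pvBlanks c (a + 1) b : Int)) :: pvSegs c (b :: rest) n

def pvSegsInit (c : List String) : List Nat → List (Int × Int × Int)
  | [] => []
  | [_] => []
  | a :: b :: rest =>
      ((a : Int), (b : Int), (pvBlanks c (a + 1) b : Int)) :: pvSegsInit c (b :: rest)

lemma pvBlanks_self (c : List String) (a : Nat) : pvBlanks c a a = 0 := by
  simp [pvBlanks]

lemma pvBlanks_succ (c : List String) (a n : Nat) (h : a ≤ n) :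
    pvBlanks c a (n + 1) = pvBlanks c a n + (if pvBlank c n then 1 else 0) := by
  have h1 : n + 1 - a = (n - a) + 1 := by omega
  have h2 : a + (n - a) = n := by omega
  rw [pvBlanks, pvBlanks, h1, List.range'_concat]
  have h3 : a + 1 * (n - a) = n := by omega
  rw [h3, List.filter_append, List.length_append]
  split_ifs with hb <;> simp [hb]

lemma pvSegsInit_concat (c : List String) (n : Nat) : ∀ l : List Nat,
    pvSegsInit c (l ++ [n]) = pvSegsInit c l ++
      (match l.getLast? with
       | none => []
       | some a => [((a : Int), (n : Int), (pvBlanks c (a + 1) n : Int))]) := by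
  intro l
  induction l with
  | nil => simp [pvSegsInit]
  | cons a tl ih =>
    cases tl with
    | nil => simp [pvSegsInit]
    | cons b rest =>
      simp only [List.cons_append] at ih ⊢
      rw [pvSegsInit, pvSegsInit, ih, List.getLast?_cons_cons]
      cases (b :: rest).getLast? <;> simp

lemma pvSegs_of_init (c : List String) (n : Nat) : ∀ l : List Nat,
    pvSegsInit c l ++
      (match l.getLast? with
       | none => []
       | some a => [((a : Int), (n : Int), (pvBlanks c (a + 1) n : Int))]) = pvSegs c l n := by
  intro l
  induction l with
  | nil => simp [pvSegsInit, pvSegs]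
  | cons a tl ih =>
    cases tl with
    | nil => simp [pvSegsInit, pvSegs]
    | cons b rest =>
      simp only [pvSegsInit, pvSegs, List.getLast?_cons_cons, List.cons_append] at ih ⊢
      rw [ih]

def pvStateSpec (c : List String) (n : Nat) (l : List Nat) :
    List (Int × Int × Int) × Option Int × Int :=
  (pvSegsInit c l, l.getLast?.map (fun a => (a : Int)),
    match l.getLast? with
    | none => 0
    | some a => (pvBlanks c (a + 1) n : Int))

lemma foldA_spec (c : List String) (n : Nat) :
    (List.range n).foldl (collect_boundaries_step c) ([], none, 0) =
      pvStateSpec c n ((List.range n).filter (fun i => is_method c i)) := by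
  induction n with
  | zero => simp [pvStateSpec, pvSegsInit]
  | succ n ih =>
    rw [List.range_succ, List.foldl_append, List.foldl_cons, List.foldl_nil, ih,
        List.filter_append]
    by_cases h : is_method c n
    · have hfilter : List.filter (fun i => is_method c i) [n] = [n] := by simp [h]
      rw [hfilter]
      set l := (List.range n).filter (fun i => is_method c i) with hl
      cases hlast : l.getLast? with
      | none =>
        have hnil : l = [] := List.getLast?_eq_none_iff.mp hlast
        simp [hnil, collect_boundaries_step, pvStateSpec, pvSegsInit, h, pvBlanks_self]
      | some a =>
        simp [collect_boundaries_step, pvStateSpec, h, hlast, pvSegsInit_concat,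
          pvBlanks_self]
    · have hfilter : List.filter (fun i => is_method c i) [n] = [] := by simp [h]
      rw [hfilter, List.append_nil]
      set l := (List.range n).filter (fun i => is_method c i) with hl
      cases hlast : l.getLast? with
      | none =>
        simp [collect_boundaries_step, pvStateSpec, h, hlast]
      | some a =>
        have ha : a < n := by
          have hmem : a ∈ l := List.mem_of_getLast? hlast
          have : a ∈ List.range n := (List.mem_filter.mp (hl ▸ hmem)).1
          simpa using this
        have hblanks : pvBlanks c (a + 1) (n + 1)
            = pvBlanks c (a + 1) n + (if pvBlank c n then 1 else 0) := by
          exact pvBlanks_succ c (a + 1) n (by omega)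
        simp only [collect_boundaries_step, pvStateSpec, h, hlast, hblanks, pvBlank]
        by_cases hb : (PySem.Str.strip (c.getD n "") == "") = true
        · rw [beq_iff_eq] at hb
          simp only [List.getD] at hb
          simp [hb, add_comm]
        · rw [beq_iff_eq] at hb
          simp only [List.getD] at hb
          simp [hb]

def pvSeg (c : List String) (l : List Nat) (n : Nat) (j : Nat) : Int × Int × Int :=
  let start := l.getD j 0
  let stop := if j + 1 < l.length then l.getD (j + 1) 0 else n
  let blanks := ((List.range' (start + 1) (stop - (start + 1))).filter
    (fun k => PySem.Str.strip (c.getD k "") == "")).length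
  ((start : Int), (stop : Int), (blanks : Int))

lemma pvSeg_succ (c : List String) (a : Nat) (tl : List Nat) (n j : Nat) :
    pvSeg c (a :: tl) n (j + 1) = pvSeg c tl n j := by
  simp only [pvSeg, List.getD_cons_succ, List.length_cons, Nat.add_lt_add_iff_right]

lemma alt_eq_segs (c : List String) (n : Nat) : ∀ l : List Nat,
    (List.range l.length).map (pvSeg c l n) = pvSegs c l n := by
  intro l
  induction l with
  | nil => simp [pvSegs]
  | cons a tl ih =>
    rw [List.length_cons, List.range_succ_eq_map, List.map_cons, List.map_map]
    have htail : (List.range tl.length).map (pvSeg c (a :: tl) n ∘ Nat.succ)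
        = pvSegs c tl n := by
      rw [← ih]
      exact List.map_congr_left (fun j _ => pvSeg_succ c a tl n j)
    rw [htail]
    cases tl with
    | nil => simp [pvSeg, pvSegs, pvBlanks, pvBlank]
    | cons b rest => simp [pvSeg, pvSegs, pvBlanks, pvBlank]

lemma alt_eq (c : List String) :
    collect_boundaries_alt c =
      pvSegs c ((List.range c.length).filter
        (fun i => PySem.Str.startswith (PySem.Str.lstrip (c.getD i "")) "def ")) c.length := by
  rw [← alt_eq_segs]
  rfl

-- ===== VERDICT (by name: the statement is the Claim_ definition above) =====
theorem collect_boundaries_spec : Claim_equal_collect_boundaries := by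
  intro contents _
  unfold Spec_collect_boundaries
  show collect_boundaries contents = collect_boundaries_alt contents
  unfold collect_boundaries collect_boundaries_alt
  rw [foldA_spec]
  have halt := alt_eq contents
  rw [collect_boundaries_alt] at halt
  simp only [is_method]
  rw [halt]
  set l := (List.range contents.length).filter
    (fun i => PySem.Str.startswith (PySem.Str.lstrip (contents.getD i "")) "def ") with hl
  cases hlast : l.getLast? with
  | none =>
    have hnil : l = [] := List.getLast?_eq_none_iff.mp hlast
    simp [pvStateSpec, hnil, pvSegsInit, pvSegs]
  | some a =>
    have := pvSegs_of_init contents contents.length l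
    rw [hlast] at this
    simpa [pvStateSpec, hlast] using this
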